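-- pv_equiv track=rewrite | github.com/alexwhz-sjtu/FlashMTP | specforge/text_semantic_segment.py | split_input_ids_at_gaps
-- ===== SOURCE A (Python) =====
-- from typing import Iterable, List, Optional, Sequence, Tuple, Union
--
-- def split_input_ids_at_gaps(
--     input_ids: Sequence[int], gap_indices: Iterable[int]
-- ) -> List[List[int]]:
--     """gap_indices 为缝隙位置 g（在 token[g] 与 token[g+1] 之间）。"""
--     ids = list(input_ids)
--     if not ids:
--         return []
--     gaps = sorted(set(g for g in gap_indices if 0 <= g < len(ids) - 1))
--     if not gaps:
--         return [ids]
--     parts: List[List[int]] = []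
--     start = 0
--     for g in gaps:
--         parts.append(ids[start : g + 1])
--         start = g + 1
--     parts.append(ids[start:])
--     return [p for p in parts if p]
-- ===== SOURCE B (Python) =====
-- def split_input_ids_at_gaps(input_ids, gap_indices):
--     ids = list(input_ids)
--     n = len(ids)
--     cuts = set(g for g in gap_indices if 0 <= g < n - 1)
--     parts = []
--     cur = []
--     for i, tok in enumerate(ids):
--         cur.append(tok)
--         if i in cuts:
--             parts.append(cur)
--             cur = []
--     if cur:
--         parts.append(cur)
--     return parts
-- ===== Notes on version B (the rewrite author's own statement) =====
-- stated objective: alternative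
-- what changed: B replaces A's sort-the-gaps-then-slice approach with a single pass over enumerate(ids) that grows a current segment and cuts whenever the index is in the set of valid gaps, needing no sort, no slicing and no trailing empty-filter.
import Mathlib
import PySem

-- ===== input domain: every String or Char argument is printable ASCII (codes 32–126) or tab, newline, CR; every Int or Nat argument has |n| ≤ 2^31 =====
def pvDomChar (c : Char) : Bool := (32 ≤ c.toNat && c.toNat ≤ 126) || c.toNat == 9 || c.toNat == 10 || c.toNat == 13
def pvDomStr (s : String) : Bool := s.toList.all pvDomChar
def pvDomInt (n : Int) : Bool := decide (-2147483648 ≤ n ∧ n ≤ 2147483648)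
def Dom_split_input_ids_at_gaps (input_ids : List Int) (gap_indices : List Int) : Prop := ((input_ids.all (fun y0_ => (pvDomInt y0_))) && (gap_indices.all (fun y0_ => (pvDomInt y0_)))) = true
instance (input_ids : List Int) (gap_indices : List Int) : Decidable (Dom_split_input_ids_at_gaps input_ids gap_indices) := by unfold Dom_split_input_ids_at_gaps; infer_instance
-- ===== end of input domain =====

-- B replaces A's sort-then-slice with a single enumerate pass cutting at gap indices (alternative decomposition, same cost).


-- ===== PORT A =====
-- A's loop body: parts.append(ids[start:g+1]); start = g+1
def pvAStep (ids : List Int) (st : List (List Int) × Int) (g : Int) : List (List Int) × Int :=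
  (st.1 ++ [PySem.List.slice ids (some st.2) (some (g + 1))], g + 1)

def split_input_ids_at_gaps (input_ids : List Int) (gap_indices : List Int) : List (List Int) :=
  let ids := input_ids
  if ids = [] then []
  else
    let gaps := PySem.List.sorted
      (PySem.Set.ofList (gap_indices.filter (fun g => decide (0 ≤ g) && decide (g < (ids.length : Int) - 1))))
      (fun x => x) false
    if gaps = [] then [ids]
    else
      let st := gaps.foldl (pvAStep ids) ([], 0)
      let parts := st.1 ++ [PySem.List.slice ids (some st.2) none]
      parts.filter (fun p => !p.isEmpty)

-- ===== PORT B =====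
-- B's loop body: cur.append(tok); if i in cuts: parts.append(cur); cur = []
def pvScanStep (cuts : PySem.Set Int) (s : List (List Int) × List Int) (p : Int × Int) : List (List Int) × List Int :=
  let cur := s.2 ++ [p.2]
  if PySem.Set.contains cuts p.1 then (s.1 ++ [cur], []) else (s.1, cur)

def split_input_ids_at_gaps_alt (input_ids : List Int) (gap_indices : List Int) : List (List Int) :=
  let ids := input_ids
  let n : Int := ids.length
  let cuts := PySem.Set.ofList (gap_indices.filter (fun g => decide (0 ≤ g) && decide (g < n - 1)))
  let st := (PySem.List.enumerate ids 0).foldl (pvScanStep cuts) ([], [])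
  if st.2 = [] then st.1 else st.1 ++ [st.2]

-- ===== PRECONDITION & SPEC =====
def Spec_split_input_ids_at_gaps (input_ids : List Int) (gap_indices : List Int) (out : List (List Int)) : Prop := out = split_input_ids_at_gaps_alt input_ids gap_indices
instance (input_ids : List Int) (gap_indices : List Int) (out : List (List Int)) : Decidable (Spec_split_input_ids_at_gaps input_ids gap_indices out) := by unfold Spec_split_input_ids_at_gaps; infer_instance

-- ===== CLAIM (what is proved, stated in full; the proofs are below) =====
def Claim_equal_split_input_ids_at_gaps : Prop := ∀ (input_ids : List Int) (gap_indices : List Int), Dom_split_input_ids_at_gaps input_ids gap_indices → Spec_split_input_ids_at_gaps input_ids gap_indices (split_input_ids_at_gaps input_ids gap_indices)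

-- ===== LEMMAS AND PROOFS =====

-- canonical segmentation: the slices of `ids` delimited by the strictly increasing gap list
def pvSegs (ids : List Int) : List Int → Int → List (List Int)
  | [], s => [ids.drop s.toNat]
  | g :: gs, s => ((ids.drop s.toNat).take (g + 1 - s).toNat) :: pvSegs ids gs (g + 1)

-- B's final `if cur: parts.append(cur)`
def pvFinish (st : List (List Int) × List Int) : List (List Int) :=
  if st.2 = [] then st.1 else st.1 ++ [st.2]

theorem pvA_fold_eq_segs (ids : List Int) (gs : List Int) (s : Int) (parts : List (List Int))
    (hs : 0 ≤ s) (hpw : gs.Pairwise (· < ·)) (hg : ∀ g ∈ gs, s ≤ g) :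
    (gs.foldl (pvAStep ids) (parts, s)).1 ++
      [PySem.List.slice ids (some (gs.foldl (pvAStep ids) (parts, s)).2) none] =
    parts ++ pvSegs ids gs s := by
  induction gs generalizing s parts with
  | nil =>
    simp only [List.foldl_nil, pvSegs]
    rw [PySem.List.slice_from ids hs]
  | cons g t ih =>
    have hsg : s ≤ g := hg g (List.mem_cons_self ..)
    have h1 : (0:Int) ≤ g + 1 := by omega
    rw [List.foldl_cons]
    have := ih (g + 1) (parts ++ [PySem.List.slice ids (some s) (some (g + 1))]) (by omega)
      (List.pairwise_cons.mp hpw).2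
      (fun x hx => by have := (List.pairwise_cons.mp hpw).1 x hx; omega)
    simp only [pvAStep] at this ⊢
    rw [this]
    simp only [pvSegs, List.append_assoc, List.singleton_append]
    congr 2
    rw [PySem.List.slice_toNat ids hs h1]
    congr 1
    omega

theorem pvScan_nocut (cuts : PySem.Set Int) (t : List Int) (s : Int)
    (parts : List (List Int)) (cur : List Int)
    (h : ∀ i : Int, s ≤ i → i < s + (t.length : Int) → ¬ (i ∈ cuts)) :
    (PySem.List.enumerate t s).foldl (pvScanStep cuts) (parts, cur) = (parts, cur ++ t) := by
  induction t generalizing s cur with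
  | nil => simp [PySem.List.enumerate_nil]
  | cons x t ih =>
    rw [PySem.List.enumerate_cons, List.foldl_cons]
    have hns : ¬ (s ∈ cuts) := h s le_rfl (by simp only [List.length_cons]; push_cast; omega)
    have hc : PySem.Set.contains cuts s = false := by
      cases hcc : PySem.Set.contains cuts s with
      | false => rfl
      | true => exact absurd ((PySem.Set.contains_iff _ _).mp hcc) hns
    simp only [pvScanStep, hc, Bool.false_eq_true, if_false]
    rw [ih (s + 1) (cur ++ [x]) (fun i h1 h2 => h i (by omega)
      (by simp only [List.length_cons]; push_cast; omega))]
    simp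

theorem pvScan_main (cuts : PySem.Set Int) (ids : List Int) (gs : List Int) (s : Int)
    (parts : List (List Int))
    (hs : 0 ≤ s) (hsn : s < (ids.length : Int))
    (hpw : gs.Pairwise (· < ·))
    (hb : ∀ g ∈ gs, s ≤ g ∧ g < (ids.length : Int) - 1)
    (hm : ∀ i : Int, s ≤ i → i < (ids.length : Int) → (i ∈ cuts ↔ i ∈ gs)) :
    pvFinish ((PySem.List.enumerate (ids.drop s.toNat) s).foldl (pvScanStep cuts) (parts, [])) =
      parts ++ pvSegs ids gs s := by
  induction gs generalizing s parts with
  | nil =>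
    have hnc : ∀ i : Int, s ≤ i → i < s + ((ids.drop s.toNat).length : Int) → ¬ (i ∈ cuts) := by
      intro i h1 h2 hin
      have hlen : (ids.drop s.toNat).length = ids.length - s.toNat := List.length_drop
      rw [hlen] at h2
      have hi : i < (ids.length : Int) := by omega
      exact absurd ((hm i h1 hi).mp hin) (List.not_mem_nil)
    rw [pvScan_nocut cuts _ s parts [] hnc]
    have hne : ids.drop s.toNat ≠ [] := by
      intro h
      have := congrArg List.length h
      simp only [List.length_drop, List.length_nil] at this
      omega
    simp [pvFinish, pvSegs, hne]
  | cons g t ih =>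
    have hg := hb g (List.mem_cons_self ..)
    set k : Nat := (g + 1 - s).toNat with hk
    have hkpos : 0 < k := by omega
    have hdl : (ids.drop s.toNat).length = ids.length - s.toNat := List.length_drop
    have hkle : k ≤ (ids.drop s.toNat).length := by rw [hdl]; omega
    set t1 : List Int := (ids.drop s.toNat).take k with ht1
    have hdd : (ids.drop s.toNat).drop k = ids.drop ((g + 1).toNat) := by
      rw [List.drop_drop]; congr 1; omega
    have hsplit : ids.drop s.toNat = t1 ++ ids.drop ((g + 1).toNat) := by
      rw [← hdd, ht1, List.take_append_drop]
    have ht1len : t1.length = k := by rw [ht1, List.length_take]; omega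
    have ht1ne : t1 ≠ [] := by
      intro h; rw [h] at ht1len; simp at ht1len; omega
    rcases List.eq_nil_or_concat t1 with h | ⟨u, x, hux⟩
    · exact absurd h ht1ne
    rw [List.concat_eq_append] at hux
    have hulen : u.length = k - 1 := by
      have := congrArg List.length hux
      rw [ht1len] at this; simp at this; omega
    rw [hsplit, hux, List.append_assoc, PySem.List.enumerate_append, List.foldl_append]
    have hnocut_u : ∀ i : Int, s ≤ i → i < s + (u.length : Int) → ¬ (i ∈ cuts) := by
      intro i h1 h2 hin
      have hig : i < g := by omega
      have := (hm i h1 (by omega)).mp hin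
      rcases List.mem_cons.mp this with h | h
      · omega
      · have := (List.pairwise_cons.mp hpw).1 i h; omega
    rw [pvScan_nocut cuts u s parts [] hnocut_u]
    rw [List.singleton_append, PySem.List.enumerate_cons, List.foldl_cons]
    have hidx : s + (u.length : Int) = g := by omega
    have hgcut : PySem.Set.contains cuts (s + (u.length : Int)) = true := by
      rw [hidx]
      cases hcc : PySem.Set.contains cuts g with
      | true => rfl
      | false =>
        have : g ∈ cuts := (hm g (by omega) (by omega)).mpr (List.mem_cons_self ..)
        rw [← PySem.Set.contains_iff cuts g, hcc] at this
        exact absurd this (by simp)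
    simp only [pvScanStep, hgcut, if_true]
    have hstep : s + (u.length : Int) + 1 = g + 1 := by omega
    rw [hstep]
    have hrec := ih (g + 1) (parts ++ [([] : List Int) ++ u ++ [x]]) (by omega) (by omega)
      (List.pairwise_cons.mp hpw).2
      (fun y hy => ⟨by have := (List.pairwise_cons.mp hpw).1 y hy; omega,
                    (hb y (List.mem_cons_of_mem _ hy)).2⟩)
      (fun i h1 h2 => by
        rw [hm i (by omega) h2, List.mem_cons]
        constructor
        · rintro (h | h)
          · omega
          · exact h
        · intro h; right; exact h)
    rw [hrec]
    simp only [pvSegs, List.append_assoc, List.singleton_append, List.nil_append]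
    congr 2
    exact hux.symm

-- every segment is nonempty, so A's trailing filter is the identity
theorem pvSegs_filter (ids : List Int) (gs : List Int) (s : Int)
    (hs : 0 ≤ s) (hsn : s < (ids.length : Int))
    (hpw : gs.Pairwise (· < ·))
    (hb : ∀ g ∈ gs, s ≤ g ∧ g < (ids.length : Int) - 1) :
    (pvSegs ids gs s).filter (fun p => !p.isEmpty) = pvSegs ids gs s := by
  induction gs generalizing s with
  | nil =>
    have hne : ids.drop s.toNat ≠ [] := by
      intro h
      have := congrArg List.length h
      simp only [List.length_drop, List.length_nil] at this
      omega
    simp [pvSegs, hne]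
  | cons g t ih =>
    have hg := hb g (List.mem_cons_self ..)
    have hne : (ids.drop s.toNat).take (g + 1 - s).toNat ≠ [] := by
      intro h
      have := congrArg List.length h
      simp only [List.length_take, List.length_drop, List.length_nil] at this
      omega
    simp only [pvSegs, List.filter_cons]
    rw [ih (g + 1) (by omega) (by omega) (List.pairwise_cons.mp hpw).2
      (fun y hy => ⟨by have := (List.pairwise_cons.mp hpw).1 y hy; omega,
                    (hb y (List.mem_cons_of_mem _ hy)).2⟩)]
    simp [hne]

-- ===== VERDICT (by name: the statement is the Claim_ definition above) =====
theorem split_input_ids_at_gaps_spec : Claim_equal_split_input_ids_at_gaps := by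
  intro input_ids gap_indices _hdom
  unfold Spec_split_input_ids_at_gaps split_input_ids_at_gaps split_input_ids_at_gaps_alt
  by_cases hids : input_ids = []
  · subst hids
    simp [PySem.List.enumerate_nil]
  · simp only [hids, if_false]
    set cuts := PySem.Set.ofList
      (gap_indices.filter (fun g => decide (0 ≤ g) && decide (g < (input_ids.length : Int) - 1))) with hcuts
    set L := PySem.List.sorted cuts (fun x => x) false with hL
    have hpos : 0 < input_ids.length := List.length_pos_iff.mpr hids
    have hpw : L.Pairwise (· < ·) := PySem.List.sorted_ofList_pairwise_lt _
    have hmemL : ∀ i : Int, i ∈ cuts ↔ i ∈ L := by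
      intro i
      rw [hL, PySem.List.mem_sorted]
    have hb : ∀ g ∈ L, 0 ≤ g ∧ g < (input_ids.length : Int) - 1 := by
      intro g hgL
      have hgc : g ∈ cuts := (hmemL g).mpr hgL
      rw [hcuts, PySem.Set.mem_ofList, List.mem_filter] at hgc
      simp only [Bool.and_eq_true, decide_eq_true_eq] at hgc
      exact hgc.2
    have hmain := pvScan_main cuts input_ids L 0 [] le_rfl (by exact_mod_cast hpos) hpw hb
      (fun i _ _ => hmemL i)
    simp only [Int.toNat_zero, List.drop_zero, List.nil_append, pvFinish] at hmain
    by_cases hLnil : L = []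
    · rw [hLnil] at hmain
      simp only [pvSegs, Int.toNat_zero, List.drop_zero] at hmain
      simp only [hLnil, if_true]
      exact hmain.symm
    · simp only [hLnil, if_false]
      rw [pvA_fold_eq_segs input_ids L 0 [] le_rfl hpw (fun g hg => (hb g hg).1), List.nil_append,
        pvSegs_filter input_ids L 0 le_rfl (by exact_mod_cast hpos) hpw hb]
      exact hmain.symm
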